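-- pv_equiv track=rewrite | github.com/jkunisch/archlens | action/blast_radius.py | _bfs_reverse
-- ===== SOURCE A (Python) =====
-- from collections import deque
--
-- def _bfs_reverse(start: str, reverse_adj: dict[str, set[str]]) -> set[str]:
--     """BFS from start node following reverse edges. Returns all reachable nodes."""
--     visited: set[str] = set()
--     queue: deque[str] = deque([start])
--
--     while queue:
--         current = queue.popleft()
--         for neighbor in reverse_adj.get(current, set()):
--             if neighbor not in visited and neighbor != start:
--                 visited.add(neighbor)
--                 queue.append(neighbor)
--
--     return visited
-- ===== SOURCE B (Python) =====
-- def _bfs_reverse(start: str, reverse_adj: dict[str, set[str]]) -> set[str]: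
--     """Bellman-Ford-style saturation: sweep the whole edge list until no new
--     node appears, instead of a worklist BFS. Returns the same reachable set."""
--     reachable: set[str] = {start}
--     changed = True
--     while changed:
--         changed = False
--         for node, neighbors in reverse_adj.items():
--             if node in reachable:
--                 for nb in neighbors:
--                     if nb not in reachable:
--                         reachable.add(nb)
--                         changed = True
--     reachable.discard(start)
--     return reachable
-- ===== Notes on version B (the rewrite author's own statement) =====
-- stated objective: alternative
-- what changed: Replaces the worklist BFS (FIFO deque, one node expanded per step, visited set) by a Bellman-Ford-style saturation: repeated full sweeps over the adjacency items that add the neighbours of every already-reachable node until a sweep adds nothing, then discard the start node; the Lean Pre_ additionally requires pairwise-distinct keys, which merely states that reverse_adj is a Python dict.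
import Mathlib
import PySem

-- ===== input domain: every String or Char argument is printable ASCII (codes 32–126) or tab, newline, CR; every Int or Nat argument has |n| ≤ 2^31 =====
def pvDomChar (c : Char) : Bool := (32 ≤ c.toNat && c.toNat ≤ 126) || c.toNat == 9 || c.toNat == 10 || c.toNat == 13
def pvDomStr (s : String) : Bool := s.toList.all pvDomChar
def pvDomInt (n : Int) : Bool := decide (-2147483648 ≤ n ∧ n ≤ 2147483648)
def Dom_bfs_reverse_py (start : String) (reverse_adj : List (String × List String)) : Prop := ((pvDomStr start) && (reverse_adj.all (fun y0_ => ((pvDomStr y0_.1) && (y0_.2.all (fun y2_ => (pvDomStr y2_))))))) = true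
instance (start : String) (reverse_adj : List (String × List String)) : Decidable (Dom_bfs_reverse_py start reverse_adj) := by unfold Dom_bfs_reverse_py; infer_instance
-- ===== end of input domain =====

-- B replaces A's worklist BFS (a FIFO deque, one node expanded per step) by a
-- Bellman-Ford-style saturation: repeated full sweeps over the adjacency items,
-- adding the neighbours of every already-reachable node, until a sweep adds nothing.
-- Same reachable set; B is not faster (worst case O(V·E) vs A's O(V+E)).
-- Both Pythons RETURN A SET (unordered); each port returns the canonical sorted
-- list of that set's distinct elements — exact as a set value (the tester compares
-- set outputs ignoring order; a Python list of A's set would be hash-order dependent).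

-- ===== PORT A =====

-- reverse_adj.get(k, set()) : first-match association-list lookup, [] when the key is absent (exact)
def pvGet (reverse_adj : List (String × List String)) (k : String) : List String :=
  match reverse_adj with
  | [] => []
  | (k', v) :: rest => if k' = k then v else pvGet rest k

-- the body of A's inner 'for neighbor in …' loop: state = (visited, appended-this-round)
def pvStep (start : String) (va : List String × List String) (n : String) : List String × List String :=
  if n ∉ va.1 ∧ n ≠ start then (va.1 ++ [n], va.2 ++ [n]) else va

-- termination measure: neighbours (with multiplicity) not yet visited
def pvRemaining (reverse_adj : List (String × List String)) (visited : List String) : Nat :=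
  ((reverse_adj.flatMap Prod.snd).filter (fun x => !visited.contains x)).length

-- the fold of pvStep appends one block of new nodes to both components
theorem pvStep_fold_spec (start : String) :
    ∀ (l v a : List String),
      l.foldl (pvStep start) (v, a)
        = (v ++ (l.foldl (pvStep start) (v, [])).2, a ++ (l.foldl (pvStep start) (v, [])).2) := by
  intro l
  induction l with
  | nil => intro v a; simp
  | cons n l ih =>
    intro v a
    simp only [List.foldl_cons, pvStep]
    by_cases h : n ∉ v ∧ n ≠ start
    · simp only [if_pos h, List.nil_append]
      rw [ih (v ++ [n]) (a ++ [n]), ih (v ++ [n]) [n]]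
      simp
    · simp only [if_neg h]
      exact ih v a

theorem pvStep_fold_mem (start : String) :
    ∀ (l v : List String), ∀ n ∈ (l.foldl (pvStep start) (v, [])).2, n ∈ l ∧ n ∉ v := by
  intro l
  induction l with
  | nil => intro v n hn; simp at hn
  | cons m l ih =>
    intro v n hn
    simp only [List.foldl_cons, pvStep] at hn
    by_cases h : m ∉ v ∧ m ≠ start
    · rw [if_pos h] at hn
      simp only [List.nil_append] at hn
      rw [pvStep_fold_spec start l (v ++ [m]) [m]] at hn
      simp only [List.mem_append, List.mem_singleton] at hn
      rcases hn with hn | hn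
      · exact ⟨by simp [hn], by simpa [hn] using h.1⟩
      · rcases ih (v ++ [m]) n hn with ⟨h1, h2⟩
        exact ⟨by simp [h1], fun hv => h2 (by simp [hv])⟩
    · rw [if_neg h] at hn
      rcases ih v n hn with ⟨h1, h2⟩
      exact ⟨by simp [h1], h2⟩

theorem pvGet_subset_flatMap (reverse_adj : List (String × List String)) (k : String) :
    ∀ n ∈ pvGet reverse_adj k, n ∈ reverse_adj.flatMap Prod.snd := by
  induction reverse_adj with
  | nil => intro n hn; simp [pvGet] at hn
  | cons p rest ih =>
    intro n hn
    simp only [pvGet] at hn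
    by_cases h : p.1 = k
    · rw [if_pos h] at hn
      exact List.mem_flatMap.2 ⟨p, by simp, hn⟩
    · rw [if_neg h] at hn
      simp only [List.flatMap_cons, List.mem_append]
      exact Or.inr (ih n hn)

theorem pvFilter_le (L v w : List String) :
    (L.filter (fun x => !(v ++ w).contains x)).length
      ≤ (L.filter (fun x => !v.contains x)).length := by
  simp only [← List.countP_eq_length_filter]
  apply List.countP_mono_left
  intro x _ hx
  simp only [Bool.not_eq_eq_eq_not, Bool.not_true, List.contains_eq_mem, decide_eq_false_iff_not,
    List.mem_append] at hx ⊢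
  tauto

theorem pvFilter_lt (L v w : List String) (n : String)
    (hn : n ∈ L) (hnv : n ∉ v) (hnw : n ∈ w) :
    (L.filter (fun x => !(v ++ w).contains x)).length
      < (L.filter (fun x => !v.contains x)).length := by
  induction L with
  | nil => simp at hn
  | cons m L ih =>
    simp only [List.mem_cons] at hn
    by_cases hm : m = n
    · subst hm
      simp only [List.filter_cons, List.contains_eq_mem, List.mem_append]
      have h1 : (!decide (m ∈ v ∨ m ∈ w)) = false := by simp [Or.inr hnw]
      have h2 : (!decide (m ∈ v)) = true := by simp [hnv]
      rw [h1, h2]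
      simp only [Bool.false_eq_true, if_false, if_true, List.length_cons]
      have := pvFilter_le L v w
      simp only [List.contains_eq_mem, List.mem_append] at this
      omega
    · rcases hn with hn | hn
      · exact absurd hn.symm hm
      · have := ih hn
        simp only [List.filter_cons]
        by_cases hmem : (!(v ++ w).contains m) = true
        · have hv : (!v.contains m) = true := by
            simp only [Bool.not_eq_eq_eq_not, Bool.not_true, List.contains_eq_mem,
              decide_eq_false_iff_not, List.mem_append] at hmem ⊢
            tauto
          rw [if_pos hmem, if_pos hv]
          simpa using this
        · rw [if_neg hmem]
          by_cases hv : (!v.contains m) = true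
          · rw [if_pos hv]; simp only [List.length_cons]; omega
          · rw [if_neg hv]; exact this

theorem pvRemaining_append_lt (reverse_adj : List (String × List String)) (v w : List String)
    (n : String) (hn : n ∈ reverse_adj.flatMap Prod.snd) (hnv : n ∉ v) (hnw : n ∈ w) :
    pvRemaining reverse_adj (v ++ w) < pvRemaining reverse_adj v :=
  pvFilter_lt _ v w n hn hnv hnw

-- A's while loop: pop the head of the FIFO queue, fold its neighbours, append the new nodes
def bfsA_loop (start : String) (reverse_adj : List (String × List String))
    (visited queue : List String) : List String :=
  match queue with
  | [] => visited
  | current :: rest =>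
    let r := (pvGet reverse_adj current).foldl (pvStep start) (visited, [])
    bfsA_loop start reverse_adj r.1 (rest ++ r.2)
termination_by (pvRemaining reverse_adj visited, queue.length)
decreasing_by
  have hspec := pvStep_fold_spec start (pvGet reverse_adj current) visited []
  simp only [List.nil_append] at hspec
  rcases hw : ((pvGet reverse_adj current).foldl (pvStep start) (visited, [])).2 with _ | ⟨n, w'⟩
  · have h1 : ((pvGet reverse_adj current).foldl (pvStep start) (visited, [])).1 = visited := by
      rw [hspec, hw]; simp
    rw [h1]
    apply Prod.Lex.right
    simp
  · apply Prod.Lex.left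
    have hmem := pvStep_fold_mem start (pvGet reverse_adj current) visited n (by rw [hw]; simp)
    have h1 : ((pvGet reverse_adj current).foldl (pvStep start) (visited, [])).1
        = visited ++ ((pvGet reverse_adj current).foldl (pvStep start) (visited, [])).2 := by
      rw [hspec]
    rw [h1]
    exact pvRemaining_append_lt reverse_adj visited _ n
      (pvGet_subset_flatMap reverse_adj current n hmem.1) hmem.2 (by rw [hw]; simp)

-- A returns the set 'visited': canonical sorted list of its distinct elements
def bfs_reverse_py (start : String) (reverse_adj : List (String × List String)) : List String :=
  PySem.List.sorted (bfsA_loop start reverse_adj [] [start]) (fun x => x) false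

-- ===== PORT B =====

-- the body of B's inner 'for nb in neighbors' loop: state = (reachable, changed)
def pvAdd (rc : List String × Bool) (nb : String) : List String × Bool :=
  if nb ∈ rc.1 then rc else (rc.1 ++ [nb], true)

-- the body of B's 'for node, neighbors in reverse_adj.items()' loop
def pvSweepStep (rc : List String × Bool) (p : String × List String) : List String × Bool :=
  if p.1 ∈ rc.1 then p.2.foldl pvAdd rc else rc

-- the nodes one inner fold adds (proof-side mirror of the fold)
def pvNewL (l r : List String) : List String :=
  match l with
  | [] => []
  | x :: t => if x ∈ r then pvNewL t r else x :: pvNewL t (r ++ [x])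

-- the nodes one full sweep adds
def pvNewS (pairs : List (String × List String)) (r : List String) : List String :=
  match pairs with
  | [] => []
  | p :: t =>
    if p.1 ∈ r then pvNewL p.2 r ++ pvNewS t (r ++ pvNewL p.2 r) else pvNewS t r

theorem pvAdd_fold_eq : ∀ (l r : List String) (c : Bool),
    l.foldl pvAdd (r, c) = (r ++ pvNewL l r, c || !(pvNewL l r).isEmpty) := by
  intro l
  induction l with
  | nil => intro r c; simp [pvNewL]
  | cons x t ih =>
    intro r c
    simp only [List.foldl_cons, pvAdd, pvNewL]
    by_cases h : x ∈ r
    · rw [if_pos h, if_pos h]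
      exact ih r c
    · rw [if_neg h, if_neg h]
      rw [ih (r ++ [x]) true]
      simp

theorem pvSweep_fold_eq : ∀ (pairs : List (String × List String)) (r : List String) (c : Bool),
    pairs.foldl pvSweepStep (r, c) = (r ++ pvNewS pairs r, c || !(pvNewS pairs r).isEmpty) := by
  intro pairs
  induction pairs with
  | nil => intro r c; simp [pvNewS]
  | cons p t ih =>
    intro r c
    simp only [List.foldl_cons, pvSweepStep, pvNewS]
    by_cases h : p.1 ∈ r
    · rw [if_pos h, if_pos h, pvAdd_fold_eq, ih]
      cases h2 : pvNewL p.2 r <;> simp [h2]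
    · rw [if_neg h, if_neg h]
      exact ih r c

theorem pvNewL_mem : ∀ (l r : List String), ∀ x ∈ pvNewL l r, x ∈ l ∧ x ∉ r := by
  intro l
  induction l with
  | nil => intro r x hx; simp [pvNewL] at hx
  | cons y t ih =>
    intro r x hx
    simp only [pvNewL] at hx
    by_cases h : y ∈ r
    · rw [if_pos h] at hx
      rcases ih r x hx with ⟨h1, h2⟩
      exact ⟨by simp [h1], h2⟩
    · rw [if_neg h] at hx
      rcases List.mem_cons.1 hx with hx | hx
      · subst hx; exact ⟨by simp, h⟩
      · rcases ih (r ++ [y]) x hx with ⟨h1, h2⟩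
        exact ⟨by simp [h1], fun hr => h2 (by simp [hr])⟩

theorem pvNewS_mem : ∀ (pairs : List (String × List String)) (r : List String),
    ∀ x ∈ pvNewS pairs r, x ∈ pairs.flatMap Prod.snd ∧ x ∉ r := by
  intro pairs
  induction pairs with
  | nil => intro r x hx; simp [pvNewS] at hx
  | cons p t ih =>
    intro r x hx
    simp only [pvNewS] at hx
    by_cases h : p.1 ∈ r
    · rw [if_pos h] at hx
      simp only [List.mem_append] at hx
      rcases hx with hx | hx
      · rcases pvNewL_mem p.2 r x hx with ⟨h1, h2⟩
        exact ⟨List.mem_flatMap.2 ⟨p, by simp, h1⟩, h2⟩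
      · rcases ih (r ++ pvNewL p.2 r) x hx with ⟨h1, h2⟩
        refine ⟨by simp only [List.flatMap_cons, List.mem_append]; exact Or.inr h1, ?_⟩
        exact fun hr => h2 (by simp [hr])
    · rw [if_neg h] at hx
      rcases ih r x hx with ⟨h1, h2⟩
      exact ⟨by simp only [List.flatMap_cons, List.mem_append]; exact Or.inr h1, h2⟩

-- one full sweep: B's 'for node, neighbors in reverse_adj.items()' pass
def pvSweep (pairs : List (String × List String)) (rc : List String × Bool) :
    List String × Bool :=
  pairs.foldl pvSweepStep rc

theorem pvSweep_eq (pairs : List (String × List String)) (r : List String) (c : Bool) :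
    pvSweep pairs (r, c) = (r ++ pvNewS pairs r, c || !(pvNewS pairs r).isEmpty) :=
  pvSweep_fold_eq pairs r c

theorem pvRemaining_lt_of_ne (adj : List (String × List String)) (r : List String)
    (h : pvNewS adj r ≠ []) :
    pvRemaining adj (r ++ pvNewS adj r) < pvRemaining adj r := by
  cases hw : pvNewS adj r with
  | nil => exact absurd hw h
  | cons n w' =>
    have hmem := pvNewS_mem adj r n (by rw [hw]; simp)
    exact pvRemaining_append_lt adj r _ n hmem.1 hmem.2 (by simp [hw])

-- B's while loop: one full sweep per iteration, repeat while the changed flag is set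
def bfsB_loop (reverse_adj : List (String × List String)) (reachable : List String) :
    List String :=
  let rc := pvSweep reverse_adj (reachable, false)
  if rc.2 then bfsB_loop reverse_adj rc.1 else rc.1
termination_by pvRemaining reverse_adj reachable
decreasing_by
  rename_i h
  have h2 : (pvSweep reverse_adj (reachable, false)).2 = true := h
  rw [pvSweep_eq] at h2
  simp only [Bool.false_or] at h2
  have hne : pvNewS reverse_adj reachable ≠ [] := by
    intro h0; rw [h0] at h2; simp at h2
  show pvRemaining reverse_adj (pvSweep reverse_adj (reachable, false)).1
      < pvRemaining reverse_adj reachable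
  rw [pvSweep_eq]
  exact pvRemaining_lt_of_ne reverse_adj reachable hne

-- B returns the set 'reachable' minus start: canonical sorted list of its distinct elements
def bfs_reverse_py_alt (start : String) (reverse_adj : List (String × List String)) : List String :=
  PySem.List.sorted (PySem.Set.discard (bfsB_loop reverse_adj [start]) start) (fun x => x) false

-- ===== PRECONDITION & SPEC =====
-- Pre_ requires pairwise-distinct keys: 'reverse_adj' is a Python dict, which cannot hold
-- duplicate keys, so an association list with a repeated key represents no Python input.
def Pre_bfs_reverse_py (start : String) (reverse_adj : List (String × List String)) : Prop :=
  (reverse_adj.map Prod.fst).Nodup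
instance (start : String) (reverse_adj : List (String × List String)) : Decidable (Pre_bfs_reverse_py start reverse_adj) := by unfold Pre_bfs_reverse_py; infer_instance
def pvWitness_bfs_reverse_py : String × (List (String × List String)) :=
  ("s", [("s", ["a"]), ("a", ["b", "s"])])

def Spec_bfs_reverse_py (start : String) (reverse_adj : List (String × List String)) (out : List String) : Prop := out = bfs_reverse_py_alt start reverse_adj
instance (start : String) (reverse_adj : List (String × List String)) (out : List String) : Decidable (Spec_bfs_reverse_py start reverse_adj out) := by unfold Spec_bfs_reverse_py; infer_instance

-- ===== CLAIM (what is proved, stated in full; the proofs are below) =====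
def Claim_equal_bfs_reverse_py : Prop := ∀ (start : String) (reverse_adj : List (String × List String)), Dom_bfs_reverse_py start reverse_adj → Pre_bfs_reverse_py start reverse_adj → Spec_bfs_reverse_py start reverse_adj (bfs_reverse_py start reverse_adj)

-- ===== LEMMAS AND PROOFS =====

-- reachability along reverse edges (common characterisation of both algorithms)
def pvReach (reverse_adj : List (String × List String)) (a b : String) : Prop :=
  Relation.ReflTransGen (fun x y => y ∈ pvGet reverse_adj x) a b

-- ---- A-side: proof-side mirror of A's inner fold ----
def pvNewA (start : String) (l v : List String) : List String :=
  match l with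
  | [] => []
  | x :: t => if x ∉ v ∧ x ≠ start then x :: pvNewA start t (v ++ [x]) else pvNewA start t v

theorem pvStepA_fold_eq (start : String) : ∀ (l v a : List String),
    l.foldl (pvStep start) (v, a) = (v ++ pvNewA start l v, a ++ pvNewA start l v) := by
  intro l
  induction l with
  | nil => intro v a; simp [pvNewA]
  | cons x t ih =>
    intro v a
    simp only [List.foldl_cons, pvStep, pvNewA]
    by_cases h : x ∉ v ∧ x ≠ start
    · rw [if_pos h, if_pos h, ih (v ++ [x]) (a ++ [x])]
      simp
    · rw [if_neg h, if_neg h]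
      exact ih v a

theorem pvNewA_mem (start : String) : ∀ (l v : List String),
    ∀ x ∈ pvNewA start l v, x ∈ l ∧ x ∉ v ∧ x ≠ start := by
  intro l
  induction l with
  | nil => intro v x hx; simp [pvNewA] at hx
  | cons y t ih =>
    intro v x hx
    simp only [pvNewA] at hx
    by_cases h : y ∉ v ∧ y ≠ start
    · rw [if_pos h] at hx
      rcases List.mem_cons.1 hx with hx | hx
      · subst hx; exact ⟨by simp, h.1, h.2⟩
      · rcases ih (v ++ [y]) x hx with ⟨h1, h2, h3⟩
        exact ⟨by simp [h1], fun hv => h2 (by simp [hv]), h3⟩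
    · rw [if_neg h] at hx
      rcases ih v x hx with ⟨h1, h2, h3⟩
      exact ⟨by simp [h1], h2, h3⟩

theorem pvNewA_complete (start : String) : ∀ (l v : List String),
    ∀ x ∈ l, x = start ∨ x ∈ v ++ pvNewA start l v := by
  intro l
  induction l with
  | nil => intro v x hx; simp at hx
  | cons y t ih =>
    intro v x hx
    simp only [pvNewA]
    rcases List.mem_cons.1 hx with hx | hx
    · subst hx
      by_cases h : x ∉ v ∧ x ≠ start
      · rw [if_pos h]; right; simp
      · push_neg at h
        by_cases hv : x ∈ v
        · right
          rw [if_neg (by intro hc; exact hc.1 hv)]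
          simp [hv]
        · left; exact h hv
    · by_cases h : y ∉ v ∧ y ≠ start
      · rw [if_pos h]
        rcases ih (v ++ [y]) x hx with h1 | h1
        · exact Or.inl h1
        · right
          simp only [List.mem_append, List.mem_cons, List.mem_singleton] at h1 ⊢
          tauto
      · rw [if_neg h]
        exact ih v x hx

theorem pvNewA_nodup (start : String) : ∀ (l v : List String),
    v.Nodup → (v ++ pvNewA start l v).Nodup := by
  intro l
  induction l with
  | nil => intro v hv; simpa [pvNewA]
  | cons y t ih =>
    intro v hv
    simp only [pvNewA]
    by_cases h : y ∉ v ∧ y ≠ start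
    · rw [if_pos h]
      have := ih (v ++ [y]) (by
        rw [List.nodup_append]
        refine ⟨hv, List.nodup_singleton y, fun a ha b hb heq => h.1 ?_⟩
        have hb' : b = y := by simpa using hb
        rw [heq, hb'] at ha
        exact ha)
      simpa using this
    · rw [if_neg h]
      exact ih v hv

-- ---- A-side invariants ----
theorem bfsA_sound (start : String) (adj : List (String × List String)) :
    ∀ (v q : List String),
      (∀ n ∈ v, n ≠ start ∧ pvReach adj start n) →
      (∀ n ∈ q, pvReach adj start n) → v.Nodup →
      (bfsA_loop start adj v q).Nodup ∧
      ∀ n ∈ bfsA_loop start adj v q, n ≠ start ∧ pvReach adj start n := by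
  intro v q
  fun_induction bfsA_loop start adj v q with
  | case1 v => intro hv _ hnd; exact ⟨hnd, hv⟩
  | case2 v current rest r ih =>
    intro hv hq hnd
    have hr : r = (v ++ pvNewA start (pvGet adj current) v,
        pvNewA start (pvGet adj current) v) := by
      simpa using pvStepA_fold_eq start (pvGet adj current) v []
    rw [hr] at ih ⊢
    apply ih
    · intro n hn
      rcases List.mem_append.1 hn with hn | hn
      · exact hv n hn
      · rcases pvNewA_mem start (pvGet adj current) v n hn with ⟨h1, _, h3⟩
        exact ⟨h3, Relation.ReflTransGen.tail (hq current (by simp)) h1⟩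
    · intro n hn
      rcases List.mem_append.1 hn with hn | hn
      · exact hq n (by simp [hn])
      · rcases pvNewA_mem start (pvGet adj current) v n hn with ⟨h1, _, _⟩
        exact Relation.ReflTransGen.tail (hq current (by simp)) h1
    · exact pvNewA_nodup start (pvGet adj current) v hnd

theorem bfsA_closed (start : String) (adj : List (String × List String)) :
    ∀ (v q : List String),
      q ⊆ start :: v →
      (∀ n ∈ start :: v, n ∉ q → ∀ m ∈ pvGet adj n, m = start ∨ m ∈ v) →
      ∀ n ∈ start :: bfsA_loop start adj v q, ∀ m ∈ pvGet adj n,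
        m = start ∨ m ∈ bfsA_loop start adj v q := by
  intro v q
  fun_induction bfsA_loop start adj v q with
  | case1 v =>
    intro _ hcl n hn m hm
    exact hcl n hn (by simp) m hm
  | case2 v current rest r ih =>
    intro hq hcl
    have hr1 : r.1 = v ++ pvNewA start (pvGet adj current) v := by
      simpa using congrArg Prod.fst (pvStepA_fold_eq start (pvGet adj current) v [])
    have hr2 : r.2 = pvNewA start (pvGet adj current) v := by
      simpa using congrArg Prod.snd (pvStepA_fold_eq start (pvGet adj current) v [])
    apply ih
    · intro x hx
      rw [hr2] at hx
      rcases List.mem_append.1 hx with hx | hx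
      · have := hq (List.mem_cons.2 (Or.inr hx))
        rw [hr1]
        rcases List.mem_cons.1 this with h1 | h1
        · exact List.mem_cons.2 (Or.inl h1)
        · exact List.mem_cons.2 (Or.inr (List.mem_append.2 (Or.inl h1)))
      · rw [hr1]
        exact List.mem_cons.2 (Or.inr (List.mem_append.2 (Or.inr hx)))
    · intro n hn hnq m hm
      rw [hr1] at hn ⊢
      rw [hr2] at hnq
      by_cases hc : n = current
      · subst hc
        rcases pvNewA_complete start (pvGet adj n) v m hm with h1 | h1
        · exact Or.inl h1
        · exact Or.inr h1
      · have hnv : n ∈ start :: v := by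
          rcases List.mem_cons.1 hn with h1 | h1
          · exact List.mem_cons.2 (Or.inl h1)
          · rcases List.mem_append.1 h1 with h1 | h1
            · exact List.mem_cons.2 (Or.inr h1)
            · exact absurd (List.mem_append.2 (Or.inr h1)) hnq
        have hnq' : n ∉ current :: rest := by
          intro hc'
          rcases List.mem_cons.1 hc' with h1 | h1
          · exact hc h1
          · exact hnq (List.mem_append.2 (Or.inl h1))
        rcases hcl n hnv hnq' m hm with h1 | h1
        · exact Or.inl h1
        · exact Or.inr (List.mem_append.2 (Or.inl h1))

theorem bfsA_char (start : String) (adj : List (String × List String)) :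
    (bfsA_loop start adj [] [start]).Nodup ∧
    ∀ m, m ∈ bfsA_loop start adj [] [start] ↔ (m ≠ start ∧ pvReach adj start m) := by
  have hsound := bfsA_sound start adj [] [start] (by simp)
    (by intro n hn; simp only [List.mem_singleton] at hn; subst hn; exact .refl) (by simp)
  refine ⟨hsound.1, fun m => ⟨hsound.2 m, ?_⟩⟩
  rintro ⟨hms, hr⟩
  have hcl := bfsA_closed start adj [] [start]
    (by intro x hx; simpa using hx)
    (by intro n hn hnq; simp only [List.mem_cons, List.not_mem_nil, or_false] at hn
        exact absurd (by simp [hn]) hnq)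
  -- every reachable node is start or in the final visited list
  have key : ∀ b, pvReach adj start b → b = start ∨ b ∈ bfsA_loop start adj [] [start] := by
    intro b hb
    induction hb with
    | refl => exact Or.inl rfl
    | tail _ hedge ih =>
      rename_i b' c' _
      have hb' : b' ∈ start :: bfsA_loop start adj [] [start] := by
        rcases ih with h | h
        · simp [h]
        · exact List.mem_cons.2 (Or.inr h)
      exact hcl b' hb' _ hedge
  rcases key m hr with h | h
  · exact absurd h hms
  · exact h

-- ---- B-side lemmas ----
theorem pvNewL_complete : ∀ (l r : List String), ∀ x ∈ l, x ∈ r ++ pvNewL l r := by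
  intro l
  induction l with
  | nil => intro r x hx; simp at hx
  | cons y t ih =>
    intro r x hx
    simp only [pvNewL]
    rcases List.mem_cons.1 hx with hx | hx
    · subst hx
      by_cases h : x ∈ r
      · rw [if_pos h]; simp [h]
      · rw [if_neg h]; simp
    · by_cases h : y ∈ r
      · rw [if_pos h]; exact ih r x hx
      · rw [if_neg h]
        have := ih (r ++ [y]) x hx
        simp only [List.mem_append, List.mem_cons, List.mem_singleton] at this ⊢
        tauto

theorem pvNewL_nodup : ∀ (l r : List String), r.Nodup → (r ++ pvNewL l r).Nodup := by
  intro l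
  induction l with
  | nil => intro r hr; simpa [pvNewL]
  | cons y t ih =>
    intro r hr
    simp only [pvNewL]
    by_cases h : y ∈ r
    · rw [if_pos h]; exact ih r hr
    · rw [if_neg h]
      have := ih (r ++ [y]) (by
        rw [List.nodup_append]
        refine ⟨hr, List.nodup_singleton y, fun a ha b hb heq => h ?_⟩
        have hb' : b = y := by simpa using hb
        rw [heq, hb'] at ha
        exact ha)
      simpa using this

theorem pvNewS_nodup : ∀ (pairs : List (String × List String)) (r : List String),
    r.Nodup → (r ++ pvNewS pairs r).Nodup := by
  intro pairs
  induction pairs with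
  | nil => intro r hr; simpa [pvNewS]
  | cons p t ih =>
    intro r hr
    simp only [pvNewS]
    by_cases h : p.1 ∈ r
    · rw [if_pos h]
      have := ih (r ++ pvNewL p.2 r) (pvNewL_nodup p.2 r hr)
      simpa using this
    · rw [if_neg h]; exact ih r hr

theorem pvNewS_closed : ∀ (pairs : List (String × List String)) (r : List String),
    pvNewS pairs r = [] → ∀ p ∈ pairs, p.1 ∈ r → ∀ x ∈ p.2, x ∈ r := by
  intro pairs
  induction pairs with
  | nil => intro r _ p hp; simp at hp
  | cons q t ih =>
    intro r hnil p hp hpr x hx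
    simp only [pvNewS] at hnil
    rcases List.mem_cons.1 hp with hp | hp
    · subst hp
      rw [if_pos hpr] at hnil
      have he : pvNewL p.2 r = [] := by
        rcases List.append_eq_nil_iff.1 hnil with ⟨h1, _⟩; exact h1
      have := pvNewL_complete p.2 r x hx
      rw [he] at this
      simpa using this
    · by_cases h : q.1 ∈ r
      · rw [if_pos h] at hnil
        rcases List.append_eq_nil_iff.1 hnil with ⟨h1, h2⟩
        rw [h1, List.append_nil] at h2
        exact ih r h2 p hp hpr x hx
      · rw [if_neg h] at hnil
        exact ih r hnil p hp hpr x hx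

theorem pvNewS_sound (Inv : String → Prop) :
    ∀ (pairs : List (String × List String)) (r : List String),
      (∀ p ∈ pairs, Inv p.1 → ∀ x ∈ p.2, Inv x) →
      (∀ x ∈ r, Inv x) → ∀ x ∈ r ++ pvNewS pairs r, Inv x := by
  intro pairs
  induction pairs with
  | nil => intro r _ hr x hx; simp only [pvNewS, List.append_nil] at hx; exact hr x hx
  | cons p t ih =>
    intro r hcl hr x hx
    simp only [pvNewS] at hx
    by_cases h : p.1 ∈ r
    · rw [if_pos h] at hx
      have hr' : ∀ y ∈ r ++ pvNewL p.2 r, Inv y := by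
        intro y hy
        rcases List.mem_append.1 hy with hy | hy
        · exact hr y hy
        · exact hcl p (by simp) (hr p.1 h) y (pvNewL_mem p.2 r y hy).1
      have := ih (r ++ pvNewL p.2 r) (fun q hq => hcl q (by simp [hq])) hr'
      apply this
      simpa using hx
    · rw [if_neg h] at hx
      exact ih r (fun q hq => hcl q (by simp [hq])) hr x hx

theorem bfsB_step (adj : List (String × List String)) (r : List String) :
    bfsB_loop adj r =
      if pvNewS adj r = [] then r else bfsB_loop adj (r ++ pvNewS adj r) := by
  conv_lhs => rw [bfsB_loop]
  simp only [pvSweep_eq, Bool.false_or]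
  by_cases h : pvNewS adj r = []
  · simp [h]
  · have hb : (!(pvNewS adj r).isEmpty) = true := by
      cases hw : pvNewS adj r
      · exact absurd hw h
      · simp
    simp [hb, h]

-- induction along B's saturation loop
theorem bfsB_ind (adj : List (String × List String)) (P : List String → Prop)
    (hstep : ∀ r, (pvNewS adj r ≠ [] → P (r ++ pvNewS adj r)) → P r) :
    ∀ r, P r := by
  have H : ∀ (n : Nat) (r : List String), pvRemaining adj r ≤ n → P r := by
    intro n
    induction n with
    | zero =>
      intro r hr
      apply hstep
      intro hne
      exact absurd (Nat.lt_of_lt_of_le (pvRemaining_lt_of_ne adj r hne) hr)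
        (Nat.not_lt_zero _)
    | succ n ih =>
      intro r hr
      apply hstep
      intro hne
      exact ih _ (Nat.le_of_lt_succ (Nat.lt_of_lt_of_le (pvRemaining_lt_of_ne adj r hne) hr))
  exact fun r => H (pvRemaining adj r) r (Nat.le_refl _)

theorem bfsB_mono (adj : List (String × List String)) :
    ∀ (r : List String), r ⊆ bfsB_loop adj r := by
  apply bfsB_ind adj (fun r => r ⊆ bfsB_loop adj r)
  intro r ih
  by_cases h : pvNewS adj r = []
  · rw [bfsB_step adj r, if_pos h]
    exact fun x hx => hx
  · rw [bfsB_step adj r, if_neg h]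
    intro x hx
    exact ih h (List.mem_append.2 (Or.inl hx))

theorem bfsB_nodup (adj : List (String × List String)) :
    ∀ (r : List String), r.Nodup → (bfsB_loop adj r).Nodup := by
  apply bfsB_ind adj (fun r => r.Nodup → (bfsB_loop adj r).Nodup)
  intro r ih
  by_cases h : pvNewS adj r = []
  · rw [bfsB_step adj r, if_pos h]
    exact fun hr => hr
  · rw [bfsB_step adj r, if_neg h]
    intro hr
    exact ih h (pvNewS_nodup adj r hr)

theorem bfsB_closed (adj : List (String × List String)) :
    ∀ (r : List String), ∀ p ∈ adj, p.1 ∈ bfsB_loop adj r →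
      ∀ x ∈ p.2, x ∈ bfsB_loop adj r := by
  apply bfsB_ind adj
    (fun r => ∀ p ∈ adj, p.1 ∈ bfsB_loop adj r → ∀ x ∈ p.2, x ∈ bfsB_loop adj r)
  intro r ih
  by_cases h : pvNewS adj r = []
  · rw [bfsB_step adj r, if_pos h]
    exact pvNewS_closed adj r h
  · rw [bfsB_step adj r, if_neg h]
    exact ih h

theorem bfsB_sound (adj : List (String × List String)) (Inv : String → Prop)
    (hcl : ∀ p ∈ adj, Inv p.1 → ∀ x ∈ p.2, Inv x) :
    ∀ (r : List String), (∀ x ∈ r, Inv x) → ∀ x ∈ bfsB_loop adj r, Inv x := by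
  apply bfsB_ind adj (fun r => (∀ x ∈ r, Inv x) → ∀ x ∈ bfsB_loop adj r, Inv x)
  intro r ih
  by_cases h : pvNewS adj r = []
  · rw [bfsB_step adj r, if_pos h]
    exact fun hr => hr
  · rw [bfsB_step adj r, if_neg h]
    intro hr
    exact ih h (pvNewS_sound Inv adj r hcl hr)

theorem pvGet_cases (adj : List (String × List String)) (k : String) :
    ∀ x ∈ pvGet adj k, ∃ vs, (k, vs) ∈ adj ∧ x ∈ vs := by
  induction adj with
  | nil => intro x hx; simp [pvGet] at hx
  | cons p t ih =>
    intro x hx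
    simp only [pvGet] at hx
    by_cases h : p.1 = k
    · rw [if_pos h] at hx
      exact ⟨p.2, by simp [← h], hx⟩
    · rw [if_neg h] at hx
      rcases ih x hx with ⟨vs, h1, h2⟩
      exact ⟨vs, by simp [h1], h2⟩

theorem pvGet_eq_of_nodup (adj : List (String × List String))
    (hnd : (adj.map Prod.fst).Nodup) :
    ∀ k vs, (k, vs) ∈ adj → pvGet adj k = vs := by
  induction adj with
  | nil => intro k vs h; simp at h
  | cons p t ih =>
    intro k vs h
    simp only [List.map_cons, List.nodup_cons] at hnd
    rcases List.mem_cons.1 h with h1 | h1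
    · simp [pvGet, ← h1]
    · simp only [pvGet]
      by_cases hk : p.1 = k
      · exfalso
        apply hnd.1
        rw [hk]
        exact List.mem_map.2 ⟨(k, vs), h1, rfl⟩
      · rw [if_neg hk]
        exact ih hnd.2 k vs h1

theorem bfsB_char (start : String) (adj : List (String × List String))
    (hpre : (adj.map Prod.fst).Nodup) :
    (bfsB_loop adj [start]).Nodup ∧
    ∀ m, m ∈ bfsB_loop adj [start] ↔ pvReach adj start m := by
  refine ⟨bfsB_nodup adj [start] (by simp), fun m => ⟨?_, ?_⟩⟩
  · intro hm
    refine bfsB_sound adj (pvReach adj start) ?_ [start] ?_ m hm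
    · intro p hp hr x hx
      exact Relation.ReflTransGen.tail hr (by rw [pvGet_eq_of_nodup adj hpre p.1 p.2 hp]; exact hx)
    · intro x hx
      simp only [List.mem_singleton] at hx
      subst hx; exact .refl
  · intro hr
    induction hr with
    | refl => exact bfsB_mono adj [start] (by simp)
    | tail _ hedge ih =>
      rename_i b' c' _
      rcases pvGet_cases adj b' c' hedge with ⟨vs, h1, h2⟩
      exact bfsB_closed adj [start] (b', vs) h1 ih c' h2

-- ===== VERDICT (by name: the statement is the Claim_ definition above) =====
theorem bfs_reverse_py_spec : Claim_equal_bfs_reverse_py := by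
  intro start adj _ hpre
  unfold Spec_bfs_reverse_py bfs_reverse_py bfs_reverse_py_alt
  rcases bfsA_char start adj with ⟨hAnd, hAmem⟩
  rcases bfsB_char start adj hpre with ⟨hBnd, hBmem⟩
  apply PySem.List.sorted_eq_sorted_of_perm
  · exact fun a b h => h
  · apply (List.perm_ext_iff_of_nodup hAnd (PySem.Set.nodup_discard _ _ hBnd)).2
    intro m
    rw [hAmem m, PySem.Set.mem_discard]
    rw [hBmem m]
    tauto
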